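-- pv_equiv track=rewrite | github.com/mynl/GREAT | great/image_tools.py | authorList
-- ===== SOURCE A (Python) =====
-- def cleanName(str):
--     s = str.replace('.', '')
--     s = s.replace(', Jr', ' Jr')
--     s = s.replace('Mr ', '')
--     s = s.replace('Dr ', '')
--     s = s.replace('Prof ', '')
--     s = s.replace('Professor ', '')
--     w = s.split(', ')
--     if len(w) == 2:
--         s = w[1] + ' ' + w[0]
--     return s
--
-- def authorList(a1):
--     ## authors
--     w = list()
--     for i in a1:
--         if i.get('authors', None) is not None:
--             for s in i['authors']:
--                 w.append(cleanName(s))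
--     w.sort()
--     ws = set(w)
--     d = dict()
--     for k in ws:
--         d[k] = w.count(k)
--     return d
-- ===== SOURCE B (Python) =====
-- def cleanName(str):
--     s = str.replace('.', '')
--     s = s.replace(', Jr', ' Jr')
--     s = s.replace('Mr ', '')
--     s = s.replace('Dr ', '')
--     s = s.replace('Prof ', '')
--     s = s.replace('Professor ', '')
--     w = s.split(', ')
--     if len(w) == 2:
--         s = w[1] + ' ' + w[0]
--     return s
--
-- def authorList(a1):
--     w = []
--     for i in a1:
--         a = i.get('authors')
--         if a is not None:
--             w.extend(cleanName(s) for s in a)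
--     w.sort()
--     d = {}
--     cur = None
--     cnt = 0
--     for name in w:
--         if name == cur:
--             cnt += 1
--         else:
--             if cur is not None:
--                 d[cur] = cnt
--             cur = name
--             cnt = 1
--     if cur is not None:
--         d[cur] = cnt
--     return d
-- ===== Notes on version B (the rewrite author's own statement) =====
-- stated objective: alternative
-- what changed: Instead of iterating over set(w) and calling w.count(k) once per distinct name, B makes a single run-length pass over the sorted list, flushing each run's count into the dict when the name changes.
import Mathlib
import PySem

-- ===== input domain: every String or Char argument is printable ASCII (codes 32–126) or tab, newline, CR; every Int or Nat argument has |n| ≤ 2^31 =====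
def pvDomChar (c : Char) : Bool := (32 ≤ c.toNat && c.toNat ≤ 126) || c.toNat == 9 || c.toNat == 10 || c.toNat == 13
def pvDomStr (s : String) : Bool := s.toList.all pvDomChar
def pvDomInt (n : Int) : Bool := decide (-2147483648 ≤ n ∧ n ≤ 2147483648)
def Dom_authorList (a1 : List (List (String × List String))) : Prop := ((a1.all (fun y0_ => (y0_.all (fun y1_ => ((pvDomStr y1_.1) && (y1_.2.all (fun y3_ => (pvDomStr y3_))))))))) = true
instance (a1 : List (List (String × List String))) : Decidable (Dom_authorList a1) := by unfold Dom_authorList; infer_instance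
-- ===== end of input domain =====

-- B replaces the per-distinct-key w.count scan by a single run-length pass over the sorted list (objective: alternative).

-- ===== PORT A =====
-- shared helper: literal port of cleanName (identical in Source A and Source B)
def pvCleanName (str : String) : String :=
  let s := PySem.Str.replace str "." ""
  let s := PySem.Str.replace s ", Jr" " Jr"
  let s := PySem.Str.replace s "Mr " ""
  let s := PySem.Str.replace s "Dr " ""
  let s := PySem.Str.replace s "Prof " ""
  let s := PySem.Str.replace s "Professor " ""
  let w := (PySem.Str.split? s ", ").getD []    -- sep ", " ≠ "" so split? is some
  if w.length == 2 then PySem.List.pyGetD w 1 "" ++ " " ++ PySem.List.pyGetD w 0 "" else s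

def authorList (a1 : List (List (String × List String))) : List (String × Int) :=
  let w := a1.foldl (fun w i =>
    match (PySem.Dict.mk i).get? "authors" with
    | none => w
    | some authors => authors.foldl (fun w s => w ++ [pvCleanName s]) w) []
  let ws := PySem.List.sorted w (fun x => x) false
  let ks : PySem.Set String := PySem.Set.ofList ws
  let d := ks.foldl (fun d k => d.insert k ((PySem.List.count ws k : Int))) PySem.Dict.empty
  d.items

-- ===== PORT B =====
def authorList_alt (a1 : List (List (String × List String))) : List (String × Int) :=
  let w := a1.foldl (fun w i =>
    match (PySem.Dict.mk i).get? "authors" with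
    | none => w
    | some authors => w ++ authors.map pvCleanName) []
  let ws := PySem.List.sorted w (fun x => x) false
  let st := ws.foldl (fun (st : PySem.Dict String Int × Option String × Int) name =>
      match st with
      | (d, some c, cnt) => if name = c then (d, some c, cnt + 1) else (d.insert c cnt, some name, 1)
      | (d, none, _) => (d, some name, 1)) (PySem.Dict.empty, none, 0)
  (match st with
   | (d, some c, cnt) => d.insert c cnt
   | (d, none, _) => d).items

-- ===== PRECONDITION & SPEC =====
def Spec_authorList (a1 : List (List (String × List String))) (out : List (String × Int)) : Prop := out = authorList_alt a1
instance (a1 : List (List (String × List String))) (out : List (String × Int)) : Decidable (Spec_authorList a1 out) := by unfold Spec_authorList; infer_instance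

-- ===== CLAIM (what is proved, stated in full; the proofs are below) =====
def Claim_equal_authorList : Prop := ∀ (a1 : List (List (String × List String))), Dom_authorList a1 → Spec_authorList a1 (authorList a1)

-- ===== LEMMAS AND PROOFS =====

-- the two w-building loops produce the same list
lemma pv_w_eq (a1 : List (List (String × List String))) :
    a1.foldl (fun w i =>
      match (PySem.Dict.mk i).get? "authors" with
      | none => w
      | some authors => authors.foldl (fun w s => w ++ [pvCleanName s]) w) []
    = a1.foldl (fun w i =>
      match (PySem.Dict.mk i).get? "authors" with
      | none => w
      | some authors => w ++ authors.map pvCleanName) [] := by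
  apply congrFun
  apply congrFun
  apply congrArg
  funext w i
  cases (PySem.Dict.mk i).get? "authors" with
  | none => rfl
  | some authors => exact PySem.List.foldl_append_singleton_eq_map pvCleanName authors w

-- dedup of a cons, with the duplicates of the head removed from the tail's dedup
lemma pv_dedup_cons0 (x : String) (t : List String) :
    PySem.List.dedup (x :: t) = x :: (PySem.List.dedup t).filter (fun y => y != x) := by
  rw [PySem.List.dedup_eq_ofList, PySem.List.dedup_eq_ofList, PySem.Set.ofList_cons]
  congr 1

-- dedup commutes with filter
lemma pv_dedup_filter (p : String → Bool) (t : List String) :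
    PySem.List.dedup (t.filter p) = (PySem.List.dedup t).filter p := by
  induction t with
  | nil => rfl
  | cons a t ih =>
    cases hpa : p a with
    | false =>
      rw [List.filter_cons_of_neg (by simp [hpa]), ih, pv_dedup_cons0,
        List.filter_cons_of_neg (by simp [hpa]), List.filter_filter]
      refine (List.filter_congr ?_).symm
      intro y hy
      by_cases hya : y = a
      · subst hya; simp [hpa]
      · simp [hya]
    | true =>
      rw [List.filter_cons_of_pos (by simp [hpa]), pv_dedup_cons0, pv_dedup_cons0, ih,
        List.filter_cons_of_pos (by simp [hpa]), List.filter_filter, List.filter_filter]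
      congr 1
      apply List.filter_congr
      intro y hy
      rw [Bool.and_comm]

lemma pv_dedup_cons (x : String) (t : List String) :
    PySem.List.dedup (x :: t) = x :: PySem.List.dedup (t.filter (fun y => y != x)) := by
  rw [pv_dedup_cons0, pv_dedup_filter]

-- run-length invariant for B's counting loop
lemma pv_run (l : List String) (d : PySem.Dict String Int) (c : String) (n : Int)
    (hp : l.Pairwise (· ≤ ·)) (hc : ∀ x ∈ l, c ≤ x)
    (hdc : d.contains c = false) (hdl : ∀ x ∈ l, d.contains x = false) :
    (match l.foldl (fun (st : PySem.Dict String Int × Option String × Int) name =>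
      match st with
      | (d, some c, cnt) => if name = c then (d, some c, cnt + 1) else (d.insert c cnt, some name, 1)
      | (d, none, _) => (d, some name, 1)) (d, some c, n) with
     | (d, some c, cnt) => d.insert c cnt
     | (d, none, _) => d).items
    = d.items ++ (c, n + (l.count c : Int)) ::
        (PySem.List.dedup (l.filter (fun y => y != c))).map (fun k => (k, (l.count k : Int))) := by
  induction l generalizing d c n with
  | nil =>
    simp only [List.foldl_nil, List.count_nil, List.filter_nil]
    rw [PySem.Dict.items_insert_of_not_contains d n hdc]
    simp
  | cons x t ih =>
    simp only [List.foldl_cons]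
    by_cases hxc : x = c
    · subst hxc
      rw [if_pos rfl]
      rw [ih d x (n + 1) hp.of_cons (fun y hy => List.rel_of_pairwise_cons hp hy) hdc
        (fun y hy => hdl y (List.mem_cons_of_mem x hy))]
      rw [List.filter_cons_of_neg (by simp)]
      congr 2
      · push_cast [List.count_cons_self]; ring_nf
      · apply List.map_congr_left
        intro k hk
        have hkc : k ≠ x := by
          have := (PySem.List.mem_dedup _ _).mp hk
          have := List.of_mem_filter this
          simpa using this
        simp [Ne.symm hkc]
    · have hcx : c < x := lt_of_le_of_ne (hc x (List.mem_cons_self)) (Ne.symm hxc)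
      have hct : ∀ y ∈ t, c < y := fun y hy => lt_of_lt_of_le hcx (List.rel_of_pairwise_cons hp hy)
      simp only [if_neg hxc]
      rw [ih (d.insert c n) x 1 hp.of_cons (fun y hy => List.rel_of_pairwise_cons hp hy)
        (by rw [PySem.Dict.contains_insert]; simp [hxc, hdl x (List.mem_cons_self)])
        (fun y hy => by
          rw [PySem.Dict.contains_insert]
          simp [ne_of_gt (hct y hy), hdl y (List.mem_cons_of_mem x hy)])]
      rw [PySem.Dict.items_insert_of_not_contains d n hdc]
      have hcnotmem : c ∉ x :: t := by
        intro hmem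
        rcases List.mem_cons.mp hmem with h | h
        · exact hxc h.symm
        · exact absurd rfl (ne_of_gt (hct c h))
      rw [List.count_eq_zero.mpr hcnotmem]
      conv_rhs => rw [List.filter_cons_of_pos (by simpa using hxc)]
      have hfil : List.filter (fun y => y != c) t = t :=
        List.filter_eq_self.mpr (fun y hy => by simp [ne_of_gt (hct y hy)])
      rw [hfil, pv_dedup_cons]
      simp only [List.map_cons, List.append_assoc, List.cons_append,
        List.nil_append, Nat.cast_zero, add_zero]
      congr 2
      congr 1
      · rw [List.count_cons_self]; push_cast; ring_nf
      · apply List.map_congr_left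
        intro k hk
        have hkx : k ≠ x := by
          have := (PySem.List.mem_dedup _ _).mp hk
          have := List.of_mem_filter this
          simpa using this
        simp [Ne.symm hkx]

-- the two counting strategies agree on any sorted list
lemma pv_counts (ws : List String) (hp : ws.Pairwise (· ≤ ·)) :
    ((PySem.Set.ofList ws).foldl (fun d k => d.insert k ((PySem.List.count ws k : Int))) PySem.Dict.empty).items
    = (match ws.foldl (fun (st : PySem.Dict String Int × Option String × Int) name =>
        match st with
        | (d, some c, cnt) => if name = c then (d, some c, cnt + 1) else (d.insert c cnt, some name, 1)
        | (d, none, _) => (d, some name, 1)) (PySem.Dict.empty, none, 0) with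
       | (d, some c, cnt) => d.insert c cnt
       | (d, none, _) => d).items := by
  cases ws with
  | nil => rfl
  | cons x t =>
    rw [PySem.Dict.items_foldl_insert_fresh (PySem.Set.ofList (x :: t)) (fun a => a)
      (fun a => (PySem.List.count (x :: t) a : Int)) PySem.Dict.empty
      (fun a _ => PySem.Dict.contains_empty a)
      (by simp [PySem.Set.nodup_ofList (x :: t)])]
    simp only [List.foldl_cons]
    rw [pv_run t PySem.Dict.empty x 1 hp.of_cons
      (fun y hy => List.rel_of_pairwise_cons hp hy)
      (PySem.Dict.contains_empty x) (fun y _ => PySem.Dict.contains_empty y)]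
    rw [← PySem.List.dedup_eq_ofList, pv_dedup_cons]
    simp only [PySem.List.count_eq, List.map_cons]
    congr 2
    · push_cast [List.count_cons_self]; ring_nf
    · apply List.map_congr_left
      intro k hk
      have hkx : k ≠ x := by
        have := (PySem.List.mem_dedup _ _).mp hk
        have := List.of_mem_filter this
        simpa using this
      simp [Ne.symm hkx]

-- ===== VERDICT (by name: the statement is the Claim_ definition above) =====
theorem authorList_spec : Claim_equal_authorList := by
  unfold Claim_equal_authorList
  intro a1 _
  unfold Spec_authorList
  simp only [authorList, authorList_alt]
  rw [← pv_w_eq a1]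
  exact pv_counts _ (PySem.List.sorted_pairwise _ _)
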